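-- pv_equiv track=rewrite | github.com/c50bossio/6fb-dashboard-staging | services/campaign_management_service.py | _calculate_channel_breakdown
-- ===== SOURCE A (Python) =====
-- from typing import Optional, List, Dict, Any, Union
--
-- def _calculate_channel_breakdown(responses: List[Dict[str, Any]]) -> Dict[str, Any]:
--     """Calculate performance breakdown by channel"""
--     channels = {}
--
--     for response in responses:
--         channel = response.get('channel', 'unknown')
--         if channel not in channels:
--             channels[channel] = {
--                 'sent': 0,
--                 'delivered': 0,
--                 'opened': 0,
--                 'clicked': 0,
--                 'conversions': 0
--             }
--
--         channels[channel]['sent'] += 1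
--         if response.get('delivered_at'):
--             channels[channel]['delivered'] += 1
--         if response.get('opened_at'):
--             channels[channel]['opened'] += 1
--         if response.get('clicked_at'):
--             channels[channel]['clicked'] += 1
--         if response.get('converted'):
--             channels[channel]['conversions'] += 1
--
--     return channels
-- ===== SOURCE B (Python) =====
-- def _calculate_channel_breakdown(responses):
--     """Group responses by channel first, then reduce each group separately."""
--     groups = {}
--     for response in responses:
--         groups.setdefault(response.get('channel', 'unknown'), []).append(response)
--     return {
--         channel: {
--             'sent': len(group),
--             'delivered': sum(1 for r in group if r.get('delivered_at')),
--             'opened': sum(1 for r in group if r.get('opened_at')),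
--             'clicked': sum(1 for r in group if r.get('clicked_at')),
--             'conversions': sum(1 for r in group if r.get('converted')),
--         }
--         for channel, group in groups.items()
--     }
-- ===== Notes on version B (the rewrite author's own statement) =====
-- stated objective: alternative
-- what changed: B replaces A's single loop that creates and increments a per-channel counter dict in place with a two-phase decomposition: one pass grouping responses into channel -> list of responses (setdefault, encounter order), then a separate reduce over each group (len for sent, one sum-of-1 comprehension per remaining counter).
import Mathlib
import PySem

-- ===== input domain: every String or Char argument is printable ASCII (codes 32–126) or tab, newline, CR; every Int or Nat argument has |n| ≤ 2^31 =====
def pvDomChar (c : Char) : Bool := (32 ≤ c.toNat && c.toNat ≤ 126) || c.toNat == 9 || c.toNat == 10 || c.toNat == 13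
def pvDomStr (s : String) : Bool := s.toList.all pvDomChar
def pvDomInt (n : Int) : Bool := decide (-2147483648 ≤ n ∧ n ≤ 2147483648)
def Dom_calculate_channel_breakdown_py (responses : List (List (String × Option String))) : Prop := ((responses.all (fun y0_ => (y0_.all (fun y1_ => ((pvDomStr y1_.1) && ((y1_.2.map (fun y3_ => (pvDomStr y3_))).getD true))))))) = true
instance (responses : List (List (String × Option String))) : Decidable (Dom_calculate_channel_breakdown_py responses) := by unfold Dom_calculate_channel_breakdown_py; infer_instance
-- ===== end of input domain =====

-- B groups the responses by channel in one pass and then reduces each group separately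
-- (alternative decomposition, same asymptotic cost); proved equal to A's in-place counting loop.

-- ===== PORT A =====
-- truthiness of response.get(k) for an Optional[str] value: missing key and None and "" are falsy
def pvTruthy (v : Option (Option String)) : Bool :=
  match v with
  | some (some s) => !(s == "")
  | _ => false

-- response.get(k) on a dict given as an association list
def pvGet (r : List (String × Option String)) (k : String) : Option (Option String) :=
  (PySem.Dict.mk r).get? k

-- response.get('channel', 'unknown'); the `some none` case (value None) is outside Pre_
def pvChannel (r : List (String × Option String)) : String :=
  match pvGet r "channel" with
  | some (some s) => s
  | _ => "unknown"

def pvInitCounts : PySem.Dict String Int :=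
  PySem.Dict.mk [("sent", 0), ("delivered", 0), ("opened", 0), ("clicked", 0), ("conversions", 0)]

-- the body of A's loop, one response
def pvStepA (channels : PySem.Dict String (PySem.Dict String Int))
    (response : List (String × Option String)) : PySem.Dict String (PySem.Dict String Int) :=
  let channel := pvChannel response
  let channels := if channels.contains channel then channels else channels.insert channel pvInitCounts
  let channels := channels.modify channel pvInitCounts (fun d => d.modify "sent" 0 (· + 1))
  let channels := if pvTruthy (pvGet response "delivered_at") then
      channels.modify channel pvInitCounts (fun d => d.modify "delivered" 0 (· + 1)) else channels
  let channels := if pvTruthy (pvGet response "opened_at") then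
      channels.modify channel pvInitCounts (fun d => d.modify "opened" 0 (· + 1)) else channels
  let channels := if pvTruthy (pvGet response "clicked_at") then
      channels.modify channel pvInitCounts (fun d => d.modify "clicked" 0 (· + 1)) else channels
  let channels := if pvTruthy (pvGet response "converted") then
      channels.modify channel pvInitCounts (fun d => d.modify "conversions" 0 (· + 1)) else channels
  channels

def calculate_channel_breakdown_py (responses : List (List (String × Option String))) : List (String × List (String × Int)) :=
  ((responses.foldl pvStepA PySem.Dict.empty).items).map (fun p => (p.1, p.2.items))

-- ===== PORT B =====
-- phase 2 reduce of one group: the five-key result dict of a channel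
def pvCounts (group : List (List (String × Option String))) : List (String × Int) :=
  [ ("sent", (group.length : Int)),
    ("delivered", ((group.countP (fun r => pvTruthy (pvGet r "delivered_at"))) : Int)),
    ("opened", ((group.countP (fun r => pvTruthy (pvGet r "opened_at"))) : Int)),
    ("clicked", ((group.countP (fun r => pvTruthy (pvGet r "clicked_at"))) : Int)),
    ("conversions", ((group.countP (fun r => pvTruthy (pvGet r "converted"))) : Int)) ]

def calculate_channel_breakdown_py_alt (responses : List (List (String × Option String))) : List (String × List (String × Int)) :=
  -- phase 1: group responses by channel, encounter order (groups.setdefault(ch, []).append(r))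
  let groups : PySem.Dict String (List (List (String × Option String))) :=
    responses.foldl (fun g r => g.modify (pvChannel r) [] (· ++ [r])) PySem.Dict.empty
  groups.items.map (fun p => (p.1, pvCounts p.2))

-- ===== PRECONDITION & SPEC =====
-- Pre_ excludes responses whose 'channel' key is present with value None: there Python A returns a
-- dict keyed by None, which is not a value of the declared dict[str, dict[str, int]] type.
def Pre_calculate_channel_breakdown_py (responses : List (List (String × Option String))) : Prop :=
  ∀ r ∈ responses, pvGet r "channel" ≠ some none
instance (responses : List (List (String × Option String))) : Decidable (Pre_calculate_channel_breakdown_py responses) := by unfold Pre_calculate_channel_breakdown_py; infer_instance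

def pvWitness_calculate_channel_breakdown_py : (List (List (String × Option String))) :=
  [[("channel", some "email"), ("delivered_at", some "t")], [("converted", some "y")]]

def Spec_calculate_channel_breakdown_py (responses : List (List (String × Option String))) (out : List (String × List (String × Int))) : Prop := out = calculate_channel_breakdown_py_alt responses
instance (responses : List (List (String × Option String))) (out : List (String × List (String × Int))) : Decidable (Spec_calculate_channel_breakdown_py responses out) := by unfold Spec_calculate_channel_breakdown_py; infer_instance

-- ===== CLAIM (what is proved, stated in full; the proofs are below) =====
def Claim_equal_calculate_channel_breakdown_py : Prop := ∀ (responses : List (List (String × Option String))), Dom_calculate_channel_breakdown_py responses → Pre_calculate_channel_breakdown_py responses → Spec_calculate_channel_breakdown_py responses (calculate_channel_breakdown_py responses)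

-- ===== LEMMAS AND PROOFS =====

-- the value map carrying B's group to A's counter dict for one channel
def pvMC (l : List (List (String × Option String))) : PySem.Dict String Int :=
  PySem.Dict.mk (pvCounts l)

-- map over the values of a dict (the proof's bridge between the two accumulators)
def pvMapVal {ν μ : Type} (f : ν → μ) (d : PySem.Dict String ν) : PySem.Dict String μ :=
  PySem.Dict.mk (d.items.map (fun p => (p.1, f p.2)))

theorem pvMapVal_contains {ν μ : Type} (f : ν → μ) (d : PySem.Dict String ν) (k : String) :
    (pvMapVal f d).contains k = d.contains k := by
  simp [pvMapVal, PySem.Dict.contains, List.any_map, Function.comp_def]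

theorem pvMapVal_get? {ν μ : Type} (f : ν → μ) (d : PySem.Dict String ν) (k : String) :
    (pvMapVal f d).get? k = (d.get? k).map f := by
  simp [pvMapVal, PySem.Dict.get?, List.find?_map]
  rcases List.find? (fun p => p.1 == k) d.items with _ | p <;> rfl

theorem pvMapVal_insert {ν μ : Type} (f : ν → μ) (d : PySem.Dict String ν) (k : String) (v : ν) :
    (pvMapVal f d).insert k (f v) = pvMapVal f (d.insert k v) := by
  by_cases h : d.contains k
  · have h' : (pvMapVal f d).contains k = true := by rw [pvMapVal_contains]; exact h
    apply PySem.Dict.ext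
    simp only [PySem.Dict.insert, h', h, if_true]
    simp only [pvMapVal, List.map_map]
    apply List.map_congr_left
    intro p _
    by_cases hp : p.1 = k <;> simp [hp]
  · have hf : d.contains k = false := by simpa using h
    have h' : (pvMapVal f d).contains k = false := by rw [pvMapVal_contains]; exact hf
    apply PySem.Dict.ext
    simp only [PySem.Dict.insert, h', hf, Bool.false_eq_true, if_false]
    simp [pvMapVal]

-- an in-place update right after an insert at the same key collapses
theorem pvInsert_modify {ν : Type} (d : PySem.Dict String ν) (k : String) (dflt v : ν) (g : ν → ν) :
    (d.insert k v).modify k dflt g = d.insert k (g v) := by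
  simp [PySem.Dict.modify, PySem.Dict.getD_insert_self, PySem.Dict.insert_insert_self]

-- the composite bump A applies to the counter dict of channel c for one response
def pvBump (r : List (String × Option String)) (d : PySem.Dict String Int) : PySem.Dict String Int :=
  let d := d.modify "sent" 0 (· + 1)
  let d := if pvTruthy (pvGet r "delivered_at") then d.modify "delivered" 0 (· + 1) else d
  let d := if pvTruthy (pvGet r "opened_at") then d.modify "opened" 0 (· + 1) else d
  let d := if pvTruthy (pvGet r "clicked_at") then d.modify "clicked" 0 (· + 1) else d
  if pvTruthy (pvGet r "converted") then d.modify "conversions" 0 (· + 1) else d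

set_option maxHeartbeats 1000000 in
theorem pvBump_counts (r : List (String × Option String)) (g : List (List (String × Option String))) :
    pvBump r (pvMC g) = pvMC (g ++ [r]) := by
  cases h1 : pvTruthy (pvGet r "delivered_at") <;>
  cases h2 : pvTruthy (pvGet r "opened_at") <;>
  cases h3 : pvTruthy (pvGet r "clicked_at") <;>
  cases h4 : pvTruthy (pvGet r "converted") <;>
    (apply PySem.Dict.ext;
     simp [pvBump, pvMC, pvCounts, h1, h2, h3, h4, PySem.Dict.modify, PySem.Dict.insert,
       PySem.Dict.getD, PySem.Dict.get?, PySem.Dict.contains,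
       List.countP_append, List.find?])

-- A's loop body is: ensure the channel's counter dict exists, then apply pvBump to it
theorem pvStepA_eq_bump (d : PySem.Dict String (PySem.Dict String Int))
    (r : List (String × Option String)) :
    pvStepA d r =
      (if d.contains (pvChannel r) then d else d.insert (pvChannel r) pvInitCounts).insert
        (pvChannel r)
        (pvBump r ((if d.contains (pvChannel r) then d
                    else d.insert (pvChannel r) pvInitCounts).getD (pvChannel r) pvInitCounts)) := by
  simp only [pvStepA, pvBump]
  cases h1 : pvTruthy (pvGet r "delivered_at") <;>
  cases h2 : pvTruthy (pvGet r "opened_at") <;>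
  cases h3 : pvTruthy (pvGet r "clicked_at") <;>
  cases h4 : pvTruthy (pvGet r "converted") <;>
    simp [h1, h2, h3, h4, pvInsert_modify, PySem.Dict.modify,
      PySem.Dict.getD_insert_self, PySem.Dict.insert_insert_self]

theorem pvGet?_of_contains (g : PySem.Dict String (List (List (String × Option String))))
    (c : String) (hc : g.contains c = true) : ∃ l, g.get? c = some l := by
  have h := PySem.Dict.contains_eq_isSome_get? (d := g) (k := c)
  rw [hc] at h
  cases hg : g.get? c with
  | none => rw [hg] at h; simp at h
  | some l => exact ⟨l, rfl⟩

theorem pvGet?_of_not_contains (g : PySem.Dict String (List (List (String × Option String))))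
    (c : String) (hc : g.contains c = false) : g.get? c = none := by
  have h := PySem.Dict.contains_eq_isSome_get? (d := g) (k := c)
  rw [hc] at h
  cases hg : g.get? c with
  | none => rfl
  | some l => rw [hg] at h; simp at h

-- A's step on the mapped accumulator is B's grouping step, mapped
theorem pvStep_comm (g : PySem.Dict String (List (List (String × Option String))))
    (r : List (String × Option String)) :
    pvStepA (pvMapVal pvMC g) r = pvMapVal pvMC (g.modify (pvChannel r) [] (· ++ [r])) := by
  rw [pvStepA_eq_bump, PySem.Dict.modify]
  by_cases hc : g.contains (pvChannel r)
  · have hc' : (pvMapVal pvMC g).contains (pvChannel r) = true := by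
      rw [pvMapVal_contains]; exact hc
    rw [if_pos hc']
    obtain ⟨l, hl⟩ := pvGet?_of_contains g (pvChannel r) hc
    have hgd : (pvMapVal pvMC g).getD (pvChannel r) pvInitCounts = pvMC l := by
      rw [PySem.Dict.getD_eq_get?_getD, pvMapVal_get?, hl]; rfl
    have hgd' : g.getD (pvChannel r) [] = l := by
      rw [PySem.Dict.getD_eq_get?_getD, hl]; rfl
    rw [hgd, hgd', pvBump_counts, pvMapVal_insert]
  · have hcf : g.contains (pvChannel r) = false := by simpa using hc
    have hc' : (pvMapVal pvMC g).contains (pvChannel r) = false := by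
      rw [pvMapVal_contains]; exact hcf
    rw [if_neg (by simp [hc'])]
    have hgd' : g.getD (pvChannel r) [] = [] := by
      rw [PySem.Dict.getD_eq_get?_getD, pvGet?_of_not_contains g (pvChannel r) hcf]; rfl
    have hinit : pvInitCounts = pvMC [] := rfl
    rw [hgd', PySem.Dict.getD_insert_self, hinit, pvBump_counts,
      PySem.Dict.insert_insert_self, pvMapVal_insert, List.nil_append]

theorem pvFold_comm (rs : List (List (String × Option String)))
    (g : PySem.Dict String (List (List (String × Option String)))) :
    rs.foldl pvStepA (pvMapVal pvMC g) =
      pvMapVal pvMC (rs.foldl (fun g r => g.modify (pvChannel r) [] (· ++ [r])) g) := by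
  induction rs generalizing g with
  | nil => rfl
  | cons r rs ih => simp only [List.foldl_cons, pvStep_comm, ih]

-- ===== VERDICT (by name: the statement is the Claim_ definition above) =====
theorem calculate_channel_breakdown_py_spec : Claim_equal_calculate_channel_breakdown_py := by
  intro responses _ _
  unfold Spec_calculate_channel_breakdown_py calculate_channel_breakdown_py calculate_channel_breakdown_py_alt
  have h0 : (PySem.Dict.empty : PySem.Dict String (PySem.Dict String Int)) =
      pvMapVal pvMC PySem.Dict.empty := rfl
  rw [h0, pvFold_comm]
  simp [pvMapVal, pvMC, List.map_map, Function.comp_def]
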